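-- pv_equiv track=rewrite | github.com/mohamedmoataz-oacc/AES-DES-files-Encryptor-Decryptor | aes.py | generateByteMatrix
-- ===== SOURCE A (Python) =====
-- def generateByteMatrix(hex_data):
--     matrix = []
--     x = []
--     for i in range(0, len(hex_data), 2):
--         hex_string = hex_data[i: i+2]
--         x.append(hex_string)
--         if len(x) == 4:
--             matrix.append(x)
--             x = []
--     return matrix
-- ===== SOURCE B (Python) =====
-- def generateByteMatrix(hex_data):
--     bytes_list = [hex_data[i:i + 2] for i in range(0, len(hex_data), 2)]
--     return [bytes_list[i:i + 4] for i in range(0, len(bytes_list) // 4 * 4, 4)]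
-- ===== Notes on version B (the rewrite author's own statement) =====
-- stated objective: alternative
-- what changed: Replaces A's single accumulator-and-counter loop (partial-row state flushed at length 4) with a stateless two-pass build-then-slice: one comprehension produces all byte strings, a second slices that list into complete groups of four (floored to a multiple of 4).
import Mathlib
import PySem

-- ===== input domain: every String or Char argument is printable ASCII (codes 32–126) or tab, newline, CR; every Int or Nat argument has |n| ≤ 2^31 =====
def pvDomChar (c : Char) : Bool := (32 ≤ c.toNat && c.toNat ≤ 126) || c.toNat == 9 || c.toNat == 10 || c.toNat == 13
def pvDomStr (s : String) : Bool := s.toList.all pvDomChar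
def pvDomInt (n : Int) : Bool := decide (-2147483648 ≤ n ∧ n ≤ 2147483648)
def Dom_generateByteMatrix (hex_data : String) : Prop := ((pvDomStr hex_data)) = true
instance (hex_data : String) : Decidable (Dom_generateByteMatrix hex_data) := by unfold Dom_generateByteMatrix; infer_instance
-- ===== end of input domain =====

-- B replaces A's accumulator-and-counter loop with a stateless build-then-slice two-pass
-- decomposition (same O(n) cost, no partial-row state).

-- ===== PORT A =====
def generateByteMatrix (hex_data : String) : List (List String) :=
  ((PySem.List.pyRange 0 (PySem.Str.len hex_data) 2).foldl
    (fun (st : List (List String) × List String) i =>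
      let hex_string := PySem.Str.slice hex_data (some i) (some (i + 2))
      let x := st.2 ++ [hex_string]
      if x.length = 4 then (st.1 ++ [x], ([] : List String)) else (st.1, x))
    ([], [])).1

-- ===== PORT B =====
def generateByteMatrix_alt (hex_data : String) : List (List String) :=
  let bytes_list := (PySem.List.pyRange 0 (PySem.Str.len hex_data) 2).map
    (fun i => PySem.Str.slice hex_data (some i) (some (i + 2)))
  (PySem.List.pyRange 0 (PySem.Int.floordiv (bytes_list.length : Int) 4 * 4) 4).map
    (fun i => PySem.List.slice bytes_list (some i) (some (i + 4)))

-- ===== PRECONDITION & SPEC =====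
def Spec_generateByteMatrix (hex_data : String) (out : List (List String)) : Prop := out = generateByteMatrix_alt hex_data
instance (hex_data : String) (out : List (List String)) : Decidable (Spec_generateByteMatrix hex_data out) := by unfold Spec_generateByteMatrix; infer_instance

-- ===== CLAIM (what is proved, stated in full; the proofs are below) =====
def Claim_equal_generateByteMatrix : Prop := ∀ (hex_data : String), Dom_generateByteMatrix hex_data → Spec_generateByteMatrix hex_data (generateByteMatrix hex_data)

-- ===== LEMMAS AND PROOFS =====

-- complete groups of four, remainder dropped (the common value of both ports)
def chunk4 {α : Type} : List α → List (List α)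
  | a :: b :: c :: d :: rest => [a, b, c, d] :: chunk4 rest
  | [] => []
  | [_] => []
  | [_, _] => []
  | [_, _, _] => []

-- A's loop: flushing the 4-accumulator computes exactly the complete chunks of the mapped list
lemma foldA_eq {β : Type} (F : Int → β) (is : List Int) (m : List (List β)) :
    (is.foldl (fun (st : List (List β) × List β) i =>
        let hex_string := F i
        let x := st.2 ++ [hex_string]
        if x.length = 4 then (st.1 ++ [x], ([] : List β)) else (st.1, x)) (m, [])).1
      = m ++ chunk4 (is.map F) := by
  induction is using chunk4.induct generalizing m with
  | case1 a b c d rest ih =>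
      simp only [List.foldl_cons, List.map, chunk4]
      simp only [List.length_append, List.length_cons, List.length_nil, List.nil_append]
        at ih ⊢
      norm_num at ih ⊢
      rw [ih]
      simp
  | case2 => simp [chunk4]
  | case3 a => simp [chunk4]
  | case4 a b => simp [chunk4]
  | case5 a b c => simp [chunk4]

-- B's second pass, in drop/take form, computes the complete chunks
lemma chunkMap_eq {α : Type} (bs : List α) :
    (List.range (bs.length / 4)).map (fun k => (bs.drop (4 * k)).take 4) = chunk4 bs := by
  induction bs using chunk4.induct with
  | case1 a b c d rest ih =>
      have h4 : (a :: b :: c :: d :: rest).length / 4 = rest.length / 4 + 1 := by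
        simp only [List.length_cons]; omega
      rw [h4, List.range_succ_eq_map, List.map_cons, List.map_map]
      refine congrArg₂ List.cons (by simp) ?_
      rw [← ih]
      refine List.map_congr_left (fun k _ => ?_)
      simp only [Function.comp, Nat.succ_eq_add_one]
      rw [show 4 * (k + 1) = 4 * k + 1 + 1 + 1 + 1 from by ring]
      simp only [List.drop_succ_cons]
  | case2 => simp [chunk4]
  | case3 a => simp [chunk4]
  | case4 a b => simp [chunk4]
  | case5 a b c => simp [chunk4]

-- range(0, 4*q, 4) enumerates the multiples of four below 4*q
lemma pyRange_four (q : Nat) :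
    PySem.List.pyRange 0 ((4 * q : Nat) : Int) 4
      = (List.range q).map (fun k => ((4 * k : Nat) : Int)) := by
  rw [PySem.List.pyRange_of_pos 0 _ (by norm_num)]
  have hcnt : (if (0 : Int) < ((4 * q : Nat) : Int)
      then ((((4 * q : Nat) : Int) - 0 + 4 - 1) / 4).toNat else 0) = q := by
    split_ifs with h
    · omega
    · omega
  rw [hcnt]
  exact List.map_congr_left (fun k _ => by push_cast; ring)

-- ===== VERDICT (by name: the statement is the Claim_ definition above) =====
theorem generateByteMatrix_spec : Claim_equal_generateByteMatrix := by
  intro s _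
  have hA : generateByteMatrix s
      = chunk4 ((PySem.List.pyRange 0 (PySem.Str.len s) 2).map
          (fun i => PySem.Str.slice s (some i) (some (i + 2)))) := by
    have h := foldA_eq (fun i => PySem.Str.slice s (some i) (some (i + 2)))
      (PySem.List.pyRange 0 (PySem.Str.len s) 2) []
    rw [List.nil_append] at h
    unfold generateByteMatrix
    exact h
  have hB : generateByteMatrix_alt s
      = (PySem.List.pyRange 0 (PySem.Int.floordiv
            ((((PySem.List.pyRange 0 (PySem.Str.len s) 2).map
                (fun i => PySem.Str.slice s (some i) (some (i + 2)))).length : Int)) 4 * 4) 4).map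
          (fun i => PySem.List.slice ((PySem.List.pyRange 0 (PySem.Str.len s) 2).map
              (fun i => PySem.Str.slice s (some i) (some (i + 2)))) (some i) (some (i + 4))) := rfl
  unfold Spec_generateByteMatrix
  rw [hA, hB]
  generalize ((PySem.List.pyRange 0 (PySem.Str.len s) 2).map
      (fun i => PySem.Str.slice s (some i) (some (i + 2)))) = bs
  have hbound : PySem.Int.floordiv (bs.length : Int) 4 * 4
      = ((4 * (bs.length / 4) : Nat) : Int) := by
    rw [PySem.Int.floordiv_eq_ediv_of_pos (by norm_num)]
    omega
  rw [hbound, pyRange_four, List.map_map, ← chunkMap_eq bs]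
  refine List.map_congr_left (fun k _ => ?_)
  simp only [Function.comp]
  have h := PySem.List.slice_natCast_add bs (4 * k) 4
  simpa using h.symm
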